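-- pv_equiv track=rewrite | github.com/pypi-data/pypi-mirror-317 | packages/xython/xython-3.3.1.tar.gz/xython-3.3.1/src/xython/youtil.py | get_num_n_char_in_text
-- ===== SOURCE A (Python) =====
-- def get_num_n_char_in_text(raw_data):
-- 	"""
-- 	문자와숫자를 분리해서 리스트로 돌려주는 것이다
-- 	123wer -> ['123','wer']
-- 	"""
-- 	temp = ""
-- 	int_temp = ""
-- 	result = []
-- 	datas = str(raw_data)
-- 	for num in range(len(datas)):
-- 		if num == 0:
-- 			temp = str(datas[num])
-- 		else:
-- 			try:
-- 				fore_var = int(datas[num])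
-- 				fore_var_status = "integer"
-- 			except:
-- 				fore_var = datas[num]
-- 				fore_var_status = "string"
-- 			try:
-- 				back_var = int(datas[num - 1])
-- 				back_var_status = "integer"
-- 			except:
-- 				back_var = datas[num - 1]
-- 				back_var_status = "string"
--
-- 			if fore_var_status == back_var_status:
-- 				temp = temp + datas[num]
-- 			else:
-- 				result.append(temp)
-- 				temp = datas[num]
-- 	if len(temp) > 0:
-- 		result.append(temp)
-- 	return result
-- ===== SOURCE B (Python) =====
-- def get_num_n_char_in_text(raw_data):
--     """Split text into maximal runs of digit vs non-digit characters
--     (classified exactly as A does: int(c) succeeds)."""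
--     s = str(raw_data)
--
--     def is_digit(c):
--         try:
--             int(c)
--             return True
--         except ValueError:
--             return False
--
--     result = []
--     i = 0
--     n = len(s)
--     while i < n:
--         k = is_digit(s[i])
--         j = i + 1
--         while j < n and is_digit(s[j]) == k:
--             j += 1
--         result.append(s[i:j])
--         i = j
--     return result
-- ===== Notes on version B (the rewrite author's own statement) =====
-- stated objective: simpler
-- what changed: Replaces A's per-index previous-vs-current classification with a temp accumulator and double try/except per step by a two-pointer run scanner that classifies each character once and slices out whole maximal runs.
import Mathlib
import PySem

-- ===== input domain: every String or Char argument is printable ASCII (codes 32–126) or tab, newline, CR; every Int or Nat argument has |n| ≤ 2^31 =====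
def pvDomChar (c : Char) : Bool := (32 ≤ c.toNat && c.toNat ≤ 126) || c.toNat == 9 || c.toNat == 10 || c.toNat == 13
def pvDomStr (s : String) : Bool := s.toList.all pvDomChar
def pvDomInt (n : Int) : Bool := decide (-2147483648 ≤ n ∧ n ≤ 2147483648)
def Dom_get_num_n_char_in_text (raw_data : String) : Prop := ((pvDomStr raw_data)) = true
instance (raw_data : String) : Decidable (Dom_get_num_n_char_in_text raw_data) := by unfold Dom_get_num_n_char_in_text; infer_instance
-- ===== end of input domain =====

-- B is a simpler two-pointer run scanner; A compares each character's class with the previous one.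
-- On ASCII input int(c) succeeds for a single character exactly when c is '0'..'9' (Char.isDigit).

-- ===== PORT A =====
-- loop body of A's `for num in range(len(datas))`; state = (temp as List Char, result)
def pvBodyA (datas : List Char) (s : List Char × List String) (num : Nat) :
    List Char × List String :=
  if num = 0 then
    ([datas.getD 0 ' '], s.2)
  else
    -- `try: int(datas[num])` succeeds iff the char is a digit (ASCII domain)
    let fore_digit := (datas.getD num ' ').isDigit
    let back_digit := (datas.getD (num - 1) ' ').isDigit
    if fore_digit == back_digit then (s.1 ++ [datas.getD num ' '], s.2)
    else ([datas.getD num ' '], s.2 ++ [String.mk s.1])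

def get_num_n_char_in_text (raw_data : String) : List String :=
  let datas := raw_data.toList
  let st := (List.range datas.length).foldl (pvBodyA datas) ([], [])
  if st.1.length > 0 then st.2 ++ [String.mk st.1] else st.2

-- ===== PORT B =====
-- B's outer while-loop: peel off one maximal run (inner while = takeWhile/dropWhile) per step
def pvRuns : List Char → List String
  | [] => []
  | c :: rest =>
    String.mk (c :: rest.takeWhile (fun d => d.isDigit == c.isDigit)) ::
      pvRuns (rest.dropWhile (fun d => d.isDigit == c.isDigit))
termination_by l => l.length
decreasing_by
  simpa using Nat.lt_succ_of_le (List.length_dropWhile_le _ _)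

def get_num_n_char_in_text_alt (raw_data : String) : List String :=
  pvRuns raw_data.toList

-- ===== PRECONDITION & SPEC =====
def Spec_get_num_n_char_in_text (raw_data : String) (out : List String) : Prop := out = get_num_n_char_in_text_alt raw_data
instance (raw_data : String) (out : List String) : Decidable (Spec_get_num_n_char_in_text raw_data out) := by unfold Spec_get_num_n_char_in_text; infer_instance

-- ===== CLAIM (what is proved, stated in full; the proofs are below) =====
def Claim_equal_get_num_n_char_in_text : Prop := ∀ (raw_data : String), Dom_get_num_n_char_in_text raw_data → Spec_get_num_n_char_in_text raw_data (get_num_n_char_in_text raw_data)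

-- ===== LEMMAS AND PROOFS =====

-- A's loop for indices ≥ 1, rephrased as structural recursion carrying the previous char p
def pvLoop2 (p : Char) : List Char → List Char → List String → List Char × List String
  | [], temp, result => (temp, result)
  | c :: rest, temp, result =>
    if c.isDigit == p.isDigit then pvLoop2 c rest (temp ++ [c]) result
    else pvLoop2 c rest [c] (result ++ [String.mk temp])

def pvFinish (st : List Char × List String) : List String :=
  if st.1.length > 0 then st.2 ++ [String.mk st.1] else st.2

lemma pvGetD_mid (pre : List Char) (p : Char) (suf : List Char) :
    (pre ++ p :: suf).getD pre.length ' ' = p := by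
  simp [List.getD]

lemma pvGetD_mid1 (pre : List Char) (p c : Char) (suf : List Char) :
    (pre ++ p :: c :: suf).getD (pre.length + 1) ' ' = c := by
  simp [List.getD]

lemma pvFold_eq_loop2 (suf : List Char) :
    ∀ (pre : List Char) (p : Char) (temp : List Char) (result : List String),
    (List.range' (pre.length + 1) suf.length).foldl
        (pvBodyA (pre ++ p :: suf)) (temp, result)
      = pvLoop2 p suf temp result := by
  induction suf with
  | nil => intro pre p temp result; simp [pvLoop2]
  | cons c rest ih =>
    intro pre p temp result
    have hlen : (c :: rest).length = rest.length + 1 := rfl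
    rw [hlen, List.range'_succ, List.foldl_cons]
    have hbody : pvBodyA (pre ++ p :: c :: rest) (temp, result) (pre.length + 1)
        = if c.isDigit == p.isDigit then (temp ++ [c], result)
          else ([c], result ++ [String.mk temp]) := by
      simp only [pvBodyA, pvGetD_mid, pvGetD_mid1, Nat.add_sub_cancel,
        Nat.succ_ne_zero, if_false]
    rw [hbody]
    have hre : pre.length + 1 + 1 = (pre ++ [p]).length + 1 := by simp
    have hds : pre ++ p :: c :: rest = (pre ++ [p]) ++ c :: rest := by simp
    by_cases h : c.isDigit = p.isDigit
    · rw [if_pos (by simp [h]), hre, hds, ih (pre ++ [p]) c (temp ++ [c]) result]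
      simp only [pvLoop2]
      rw [if_pos (by simp [h])]
    · rw [if_neg (by simp [h]), hre, hds,
        ih (pre ++ [p]) c [c] (result ++ [String.mk temp])]
      simp only [pvLoop2]
      rw [if_neg (by simp [h])]

lemma pvLoop2_runs (suf : List Char) :
    ∀ (p : Char) (temp : List Char) (result : List String), temp ≠ [] →
    pvFinish (pvLoop2 p suf temp result)
      = result ++ String.mk (temp ++ suf.takeWhile (fun d => d.isDigit == p.isDigit)) ::
          pvRuns (suf.dropWhile (fun d => d.isDigit == p.isDigit)) := by
  induction suf with
  | nil =>
    intro p temp result htemp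
    simp [pvLoop2, pvFinish, pvRuns, List.length_pos_iff, htemp]
  | cons c rest ih =>
    intro p temp result htemp
    by_cases h : c.isDigit = p.isDigit
    · have hfun : (fun d : Char => d.isDigit == p.isDigit)
          = (fun d : Char => d.isDigit == c.isDigit) := by
        funext d; rw [h]
      simp only [pvLoop2]
      rw [if_pos (by simp [h]), ih c (temp ++ [c]) result (by simp), hfun]
      simp [List.takeWhile, List.dropWhile, h]
    · simp only [pvLoop2]
      rw [if_neg (by simp [h]), ih c [c] (result ++ [String.mk temp]) (by simp)]
      have hb : (c.isDigit == p.isDigit) = false := by simp [h]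
      simp [List.takeWhile, List.dropWhile, hb, pvRuns]

-- ===== VERDICT (by name: the statement is the Claim_ definition above) =====
theorem get_num_n_char_in_text_spec : Claim_equal_get_num_n_char_in_text := by
  intro raw_data _
  unfold Spec_get_num_n_char_in_text get_num_n_char_in_text get_num_n_char_in_text_alt
  cases hl : raw_data.toList with
  | nil => simp [pvRuns]
  | cons c rest =>
    simp only
    have h0 : List.range (c :: rest).length = 0 :: List.range' 1 rest.length := by
      rw [List.range_eq_range']
      simp [List.range'_succ]
    rw [h0, List.foldl_cons]
    have hb0 : pvBodyA (c :: rest) ([], []) 0 = ([c], []) := by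
      simp [pvBodyA, List.getD]
    rw [hb0]
    have := pvFold_eq_loop2 rest [] c [c] []
    simp only [List.length_nil, List.nil_append] at this
    rw [this]
    have hfin := pvLoop2_runs rest c [c] [] (by simp)
    show pvFinish (pvLoop2 c rest [c] []) = pvRuns (c :: rest)
    rw [hfin, pvRuns]
    simp
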